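-- pv_equiv track=rewrite | github.com/tanjila2020/BTC_repository_ACSOS_2024 | BTC_G.py | alternate_munkres
-- ===== SOURCE A (Python) =====
-- def alternate_munkres(matrix):
--     # Flatten the matrix and filter out None values, then sort by value, keeping track of the original indices
--     flat_matrix = [(value, row_index, col_index) for row_index, row in enumerate(matrix) for col_index, value in enumerate(row) if value is not None]
--     sorted_values = sorted(flat_matrix, key=lambda x: x[0], reverse=True)
--
--     selected_robots = {}
--     selected_tasks = set()
--     robot_availability = [True] * len(matrix)
--
--     for value, row_index, col_index in sorted_values:
--         # Select the highest values without assigning one task to multiple robots or vice versa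
--         if robot_availability[row_index] and col_index not in selected_tasks:
--             selected_robots[row_index] = col_index
--             selected_tasks.add(col_index)
--             robot_availability[row_index] = False
--
--             # Once we have allocated as many tasks as there are robots, we stop
--             if len(selected_robots) == len(matrix):
--                 break
--     total= sum(matrix[robot][task] for robot, task in selected_robots.items())
--
--     return selected_robots, total
-- ===== SOURCE B (Python) =====
-- def alternate_munkres(matrix):
--     # Greedy best-first assignment by repeated selection (argmax scan) instead of
--     # sorting all cells up front; the selection key (-value, row, col) reproduces
--     # the stable descending sort's tie-breaking.
--     cells = [(value, r, c) for r, row in enumerate(matrix) for c, value in enumerate(row) if value is not None]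
--     selected_robots = {}
--     selected_tasks = set()
--     robot_availability = [True] * len(matrix)
--     while len(selected_robots) < len(matrix):
--         best = None
--         for v, r, c in cells:
--             if robot_availability[r] and c not in selected_tasks and (best is None or (-v, r, c) < best[0]):
--                 best = ((-v, r, c), v, r, c)
--         if best is None:
--             break
--         _, v, r, c = best
--         selected_robots[r] = c
--         selected_tasks.add(c)
--         robot_availability[r] = False
--     total = sum(matrix[robot][task] for robot, task in selected_robots.items())
--     return selected_robots, total
-- ===== Notes on version B (the rewrite author's own statement) =====
-- stated objective: alternative
-- what changed: Replaces the flatten-then-full-stable-sort pipeline by repeated best-candidate selection: each round scans the unsorted cell list for the minimum (-value,row,col) key among cells whose row is still available and whose column is untaken, assigning it immediately; no sorted list is ever built.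
import Mathlib
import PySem

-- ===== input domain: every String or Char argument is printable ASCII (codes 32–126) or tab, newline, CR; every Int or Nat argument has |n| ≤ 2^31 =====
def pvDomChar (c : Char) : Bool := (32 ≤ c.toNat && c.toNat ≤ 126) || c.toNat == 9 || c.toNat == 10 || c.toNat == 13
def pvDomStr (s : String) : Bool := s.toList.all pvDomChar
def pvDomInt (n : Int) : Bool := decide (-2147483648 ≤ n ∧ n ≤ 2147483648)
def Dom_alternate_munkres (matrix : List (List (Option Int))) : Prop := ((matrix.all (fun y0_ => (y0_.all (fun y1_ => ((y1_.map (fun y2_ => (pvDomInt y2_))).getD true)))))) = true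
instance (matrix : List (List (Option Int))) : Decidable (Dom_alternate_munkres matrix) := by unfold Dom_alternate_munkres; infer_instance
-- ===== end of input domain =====

-- B replaces A's flatten-then-stable-sort pipeline by repeated best-candidate selection over
-- the unsorted cell list (argmax scan per assignment round); equal return value is proved.

-- ===== PORT A =====
-- flat_matrix comprehension: (value, row_index, col_index) for non-None cells, row-major
def pvFlatA (matrix : List (List (Option Int))) : List (Int × Int × Int) :=
  (PySem.List.enumerate matrix).flatMap (fun p =>
    (PySem.List.enumerate p.2).filterMap (fun q => q.2.map (fun v => (v, p.1, q.1))))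

-- the for-loop over sorted_values with its break; avail indexing is exact: row indices
-- produced by enumerate are always in range of robot_availability
def pvLoopA (n : Nat) : List (Int × Int × Int) → PySem.Dict Int Int → PySem.Set Int → List Bool →
    PySem.Dict Int Int × PySem.Set Int × List Bool
  | [], R, T, A => (R, T, A)
  | t :: rest, R, T, A =>
    if PySem.List.pyGetD A t.2.1 false && !(PySem.Set.contains T t.2.2) then
      let R' := PySem.Dict.insert R t.2.1 t.2.2
      let T' := PySem.Set.add T t.2.2
      let A' := PySem.List.pySetD A t.2.1 false
      if R'.items.length = n then (R', T', A') else pvLoopA n rest R' T' A'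
    else pvLoopA n rest R T A

-- total = sum(matrix[robot][task] …); lookups are exact (indices come from enumerate) and the
-- cell is non-None for every selected pair, so the Option default 0 is never taken
def pvTotalA (matrix : List (List (Option Int))) (R : List (Int × Int)) : Int :=
  R.foldl (fun acc p => acc + ((PySem.List.pyGetD (PySem.List.pyGetD matrix p.1 []) p.2 none).getD 0)) 0

def alternate_munkres (matrix : List (List (Option Int))) : (List (Int × Int)) × Int :=
  let sortedValues := PySem.List.sorted (pvFlatA matrix) (fun t => t.1) true
  let st := pvLoopA matrix.length sortedValues ⟨[]⟩ PySem.Set.empty (List.replicate matrix.length true)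
  (st.1.items, pvTotalA matrix st.1.items)

-- ===== PORT B =====
def pvFlatB (matrix : List (List (Option Int))) : List (Int × Int × Int) :=
  (PySem.List.enumerate matrix).flatMap (fun p =>
    (PySem.List.enumerate p.2).filterMap (fun q => q.2.map (fun v => (v, p.1, q.1))))

-- (-v, r, c) < (-v', r', c') lexicographically
def pvKeyLt (a b : Int × Int × Int) : Bool :=
  decide (-a.1 < -b.1) || ((-a.1 == -b.1) && (decide (a.2.1 < b.2.1) || ((a.2.1 == b.2.1) && decide (a.2.2 < b.2.2))))

-- robot_availability[r] and c not in selected_tasks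
def pvCand (T : PySem.Set Int) (A : List Bool) (t : Int × Int × Int) : Bool :=
  PySem.List.pyGetD A t.2.1 false && !(PySem.Set.contains T t.2.2)

-- the inner for-loop of B: best candidate under the (-v, r, c) key
def pvBest (cells : List (Int × Int × Int)) (T : PySem.Set Int) (A : List Bool) : Option (Int × Int × Int) :=
  cells.foldl (fun best t =>
    if pvCand T A t && (match best with | none => true | some b => pvKeyLt t b) then some t else best) none

-- the while-loop; the fuel n+1 bounds its iterations (each round disables one row)
def pvLoopB (cells : List (Int × Int × Int)) (n : Nat) :
    Nat → PySem.Dict Int Int → PySem.Set Int → List Bool →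
    PySem.Dict Int Int × PySem.Set Int × List Bool
  | 0, R, T, A => (R, T, A)
  | fuel + 1, R, T, A =>
    if R.items.length < n then
      match pvBest cells T A with
      | none => (R, T, A)
      | some t => pvLoopB cells n fuel (PySem.Dict.insert R t.2.1 t.2.2) (PySem.Set.add T t.2.2)
          (PySem.List.pySetD A t.2.1 false)
    else (R, T, A)

def pvTotalB (matrix : List (List (Option Int))) (R : List (Int × Int)) : Int :=
  R.foldl (fun acc p => acc + ((PySem.List.pyGetD (PySem.List.pyGetD matrix p.1 []) p.2 none).getD 0)) 0

def alternate_munkres_alt (matrix : List (List (Option Int))) : (List (Int × Int)) × Int :=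
  let cells := pvFlatB matrix
  let st := pvLoopB cells matrix.length (matrix.length + 1) ⟨[]⟩ PySem.Set.empty
      (List.replicate matrix.length true)
  (st.1.items, pvTotalB matrix st.1.items)

-- ===== PRECONDITION & SPEC =====
def Spec_alternate_munkres (matrix : List (List (Option Int))) (out : (List (Int × Int)) × Int) : Prop := out = alternate_munkres_alt matrix
instance (matrix : List (List (Option Int))) (out : (List (Int × Int)) × Int) : Decidable (Spec_alternate_munkres matrix out) := by unfold Spec_alternate_munkres; infer_instance

-- ===== CLAIM (what is proved, stated in full; the proofs are below) =====
def Claim_equal_alternate_munkres : Prop := ∀ (matrix : List (List (Option Int))), Dom_alternate_munkres matrix → Spec_alternate_munkres matrix (alternate_munkres matrix)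

-- ===== LEMMAS AND PROOFS =====

-- strict order "comes strictly earlier in the sorted list"
def pvLt3 (a b : Int × Int × Int) : Prop := pvKeyLt a b = true
-- strict row-major order of the flattened cells
def pvRcLt (a b : Int × Int × Int) : Prop := a.2.1 < b.2.1 ∨ (a.2.1 = b.2.1 ∧ a.2.2 < b.2.2)

lemma pvKeyLt_iff (a b : Int × Int × Int) :
    pvKeyLt a b = true ↔ (b.1 < a.1 ∨ (a.1 = b.1 ∧ (a.2.1 < b.2.1 ∨ (a.2.1 = b.2.1 ∧ a.2.2 < b.2.2)))) := by
  simp only [pvKeyLt, Bool.or_eq_true, Bool.and_eq_true, decide_eq_true_eq, beq_iff_eq]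
  omega

lemma pvKeyLt_asymm {a b : Int × Int × Int} (h : pvKeyLt a b = true) : pvKeyLt b a = false := by
  rw [pvKeyLt_iff] at h
  rw [Bool.eq_false_iff]; intro h2; rw [pvKeyLt_iff] at h2; omega

lemma pvLt3_of_rcLt {a b : Int × Int × Int} (hf : b.1 ≤ a.1) (h : pvRcLt a b) : pvLt3 a b := by
  unfold pvLt3; rw [pvKeyLt_iff]; unfold pvRcLt at h; omega

lemma pvLt3_fst {a b : Int × Int × Int} (h : pvLt3 a b) : b.1 ≤ a.1 := by
  unfold pvLt3 at h; rw [pvKeyLt_iff] at h; omega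

lemma pvRcLt_ne {a b : Int × Int × Int} (h : pvRcLt a b) : a ≠ b := by
  intro he; subst he; unfold pvRcLt at h; omega

-- ---- flattened cells: row-major strictly ordered, nonneg indices ----
lemma pvInner_aux (r : Int) (row : List (Option Int)) : ∀ s : Int,
    (((PySem.List.enumerate row s).filterMap (fun q => q.2.map (fun v => (v, r, q.1)))).Pairwise pvRcLt)
    ∧ ∀ t ∈ (PySem.List.enumerate row s).filterMap (fun q => q.2.map (fun v => (v, r, q.1))),
        t.2.1 = r ∧ s ≤ t.2.2 := by
  induction row with
  | nil => intro s; simp [PySem.List.enumerate]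
  | cons x xs ih =>
    intro s
    rw [PySem.List.enumerate_cons]
    cases x with
    | none =>
      simp only [List.filterMap_cons, Option.map_none]
      refine ⟨(ih (s+1)).1, ?_⟩
      intro t ht; have := (ih (s+1)).2 t ht; exact ⟨this.1, by omega⟩
    | some v =>
      simp only [List.filterMap_cons, Option.map_some]
      constructor
      · refine List.Pairwise.cons ?_ (ih (s+1)).1
        intro t ht
        have := (ih (s+1)).2 t ht
        right
        refine ⟨this.1.symm, ?_⟩
        show s < t.2.2
        omega
      · intro t ht
        rcases List.mem_cons.mp ht with he | hm
        · subst he; exact ⟨rfl, le_refl s⟩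
        · have := (ih (s+1)).2 t hm; exact ⟨this.1, by omega⟩

lemma pvFlat_aux (rows : List (List (Option Int))) : ∀ s : Int,
    (((PySem.List.enumerate rows s).flatMap (fun p =>
        (PySem.List.enumerate p.2).filterMap (fun q => q.2.map (fun v => (v, p.1, q.1))))).Pairwise pvRcLt)
    ∧ ∀ t ∈ (PySem.List.enumerate rows s).flatMap (fun p =>
        (PySem.List.enumerate p.2).filterMap (fun q => q.2.map (fun v => (v, p.1, q.1)))),
        s ≤ t.2.1 ∧ 0 ≤ t.2.2 := by
  induction rows with
  | nil => intro s; simp [PySem.List.enumerate]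
  | cons row rows ih =>
    intro s
    rw [PySem.List.enumerate_cons]
    simp only [List.flatMap_cons]
    have hin := pvInner_aux s row 0
    constructor
    · rw [List.pairwise_append]
      refine ⟨hin.1, (ih (s+1)).1, ?_⟩
      intro a ha b hb
      have h1 := hin.2 a ha
      have h2 := (ih (s+1)).2 b hb
      left; omega
    · intro t ht
      rcases List.mem_append.mp ht with hm | hm
      · have := hin.2 t hm; omega
      · have := (ih (s+1)).2 t hm; omega

lemma pvFlat_pairwise (matrix : List (List (Option Int))) : (pvFlatA matrix).Pairwise pvRcLt :=
  (pvFlat_aux matrix 0).1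

lemma pvFlat_nonneg (matrix : List (List (Option Int))) :
    ∀ t ∈ pvFlatA matrix, 0 ≤ t.2.1 :=
  fun t ht => ((pvFlat_aux matrix 0).2 t ht).1

lemma pvFlat_nodup (matrix : List (List (Option Int))) : (pvFlatA matrix).Nodup :=
  (pvFlat_pairwise matrix).imp (fun h => pvRcLt_ne h)

-- ---- the stable reverse sort is strictly ordered by the (-v, r, c) key ----
lemma pvInsertBy_pairwise (x : Int × Int × Int) (acc : List (Int × Int × Int))
    (hp : acc.Pairwise pvLt3) (hx : ∀ y ∈ acc, pvRcLt y x) :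
    (PySem.List.insertBy (fun a b => decide (b.1 < a.1)) x acc).Pairwise pvLt3 := by
  induction acc with
  | nil => simp [PySem.List.insertBy]
  | cons y ys ih =>
    rw [List.pairwise_cons] at hp
    by_cases hb : y.1 < x.1
    · show (List.Pairwise pvLt3 (if (decide (y.1 < x.1)) = true then x :: y :: ys else _))
      rw [if_pos (by simpa using hb)]
      refine List.Pairwise.cons ?_ (List.Pairwise.cons hp.1 hp.2)
      intro z hz
      rcases List.mem_cons.mp hz with he | hm
      · subst he; unfold pvLt3; rw [pvKeyLt_iff]; omega
      · have h1 : z.1 ≤ y.1 := pvLt3_fst (hp.1 z hm)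
        unfold pvLt3; rw [pvKeyLt_iff]; omega
    · show (List.Pairwise pvLt3 (if (decide (y.1 < x.1)) = true then x :: y :: ys else
        y :: PySem.List.insertBy (fun a b => decide (b.1 < a.1)) x ys))
      rw [if_neg (by simpa using hb)]
      refine List.Pairwise.cons ?_ (ih hp.2 (fun z hz => hx z (List.mem_cons_of_mem _ hz)))
      intro z hz
      rcases (PySem.List.mem_insertBy _ _ _ _).mp hz with he | hm
      · subst he
        have hrc : pvRcLt y z := hx y (List.mem_cons_self)
        exact pvLt3_of_rcLt (by omega) hrc
      · exact hp.1 z hm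

lemma pvFoldIns_pairwise : ∀ (l acc : List (Int × Int × Int)),
    acc.Pairwise pvLt3 → (∀ y ∈ acc, ∀ x ∈ l, pvRcLt y x) → l.Pairwise pvRcLt →
    (l.foldl (fun acc x => PySem.List.insertBy (fun a b => decide (b.1 < a.1)) x acc) acc).Pairwise pvLt3 := by
  intro l
  induction l with
  | nil => intro acc hp _ _; simpa using hp
  | cons x l ih =>
    intro acc hp hcross hl
    rw [List.pairwise_cons] at hl
    simp only [List.foldl_cons]
    refine ih _ (pvInsertBy_pairwise x acc hp (fun y hy => hcross y hy x List.mem_cons_self)) ?_ hl.2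
    intro y hy z hz
    rcases (PySem.List.mem_insertBy _ _ _ _).mp hy with he | hm
    · subst he; exact hl.1 z hz
    · exact hcross y hm z (List.mem_cons_of_mem _ hz)

lemma pvSorted_pairwise (cells : List (Int × Int × Int)) (h : cells.Pairwise pvRcLt) :
    (PySem.List.sorted cells (fun t => t.1) true).Pairwise pvLt3 := by
  rw [PySem.List.sorted_rev_eq_foldl_insertBy]
  exact pvFoldIns_pairwise cells [] (by simp) (by simp) h

-- ---- pvBest characterisation ----
lemma pvBest_none (cells : List (Int × Int × Int)) (T : PySem.Set Int) (A : List Bool)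
    (h : ∀ t ∈ cells, pvCand T A t = false) : pvBest cells T A = none := by
  unfold pvBest
  induction cells with
  | nil => rfl
  | cons x l ih =>
    simp only [List.foldl_cons, h x List.mem_cons_self, Bool.false_and, if_neg (Bool.false_ne_true)]
    exact ih (fun t ht => h t (List.mem_cons_of_mem _ ht))

lemma pvBest_acc_mem (T : PySem.Set Int) (A : List Bool) : ∀ (l : List (Int × Int × Int)) (acc b),
    l.foldl (fun best t =>
      if pvCand T A t && (match best with | none => true | some b => pvKeyLt t b) then some t else best) acc = some b →
    acc = some b ∨ (b ∈ l ∧ pvCand T A b = true) := by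
  intro l
  induction l with
  | nil => intro acc b h; exact Or.inl h
  | cons x l ih =>
    intro acc b h
    simp only [List.foldl_cons] at h
    rcases ih _ b h with hacc | hmem
    · cases acc with
      | none =>
        by_cases hcx : (pvCand T A x && true) = true
        · rw [if_pos hcx] at hacc
          rw [Option.some.injEq] at hacc
          subst hacc
          simp only [Bool.and_eq_true] at hcx
          exact Or.inr ⟨List.mem_cons_self, hcx.1⟩
        · rw [if_neg hcx] at hacc
          simp at hacc
      | some a =>
        by_cases hcx : (pvCand T A x && pvKeyLt x a) = true
        · rw [if_pos hcx] at hacc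
          rw [Option.some.injEq] at hacc
          subst hacc
          simp only [Bool.and_eq_true] at hcx
          exact Or.inr ⟨List.mem_cons_self, hcx.1⟩
        · rw [if_neg hcx] at hacc
          exact Or.inl hacc
    · exact Or.inr ⟨List.mem_cons_of_mem _ hmem.1, hmem.2⟩

lemma pvBest_stay (T : PySem.Set Int) (A : List Bool) (s : Int × Int × Int) :
    ∀ (l : List (Int × Int × Int)), (∀ t ∈ l, pvCand T A t = true → pvKeyLt t s = false) →
    l.foldl (fun best t =>
      if pvCand T A t && (match best with | none => true | some b => pvKeyLt t b) then some t else best)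
      (some s) = some s := by
  intro l
  induction l with
  | nil => intro _; rfl
  | cons x l ih =>
    intro h
    simp only [List.foldl_cons]
    have hx : (pvCand T A x && pvKeyLt x s) = false := by
      by_cases hc : pvCand T A x = true
      · simp [hc, h x List.mem_cons_self hc]
      · simp [Bool.eq_false_iff.mpr hc]
    have hstep : (if (pvCand T A x && (match (some s : Option (Int × Int × Int)) with | none => true | some b => pvKeyLt x b)) = true then some x else some s) = some s := by
      show (if (pvCand T A x && pvKeyLt x s) = true then some x else some s) = some s
      rw [hx]
      simp
    rw [hstep]
    exact ih (fun t ht => h t (List.mem_cons_of_mem _ ht))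

lemma pvBest_eq_some (cells : List (Int × Int × Int)) (T : PySem.Set Int) (A : List Bool)
    (s : Int × Int × Int) (hnd : cells.Nodup) (hs : s ∈ cells) (hcs : pvCand T A s = true)
    (hmin : ∀ t ∈ cells, pvCand T A t = true → t = s ∨ pvKeyLt s t = true) :
    pvBest cells T A = some s := by
  obtain ⟨pre, post, rfl⟩ := List.append_of_mem hs
  have hnotpre : s ∉ pre := by
    intro h
    have := List.disjoint_of_nodup_append hnd h
    simp at this
  have hnotpost : s ∉ post := by
    have := (List.nodup_append.mp hnd).2.1
    exact (List.nodup_cons.mp this).1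
  unfold pvBest
  rw [List.foldl_append, List.foldl_cons]
  set f := fun (best : Option (Int × Int × Int)) t =>
    if pvCand T A t && (match best with | none => true | some b => pvKeyLt t b) then some t else best with hf
  have hmid : f (pre.foldl f none) s = some s := by
    rcases hacc : pre.foldl f none with _ | b
    · simp [hf, hcs]
    · rcases pvBest_acc_mem T A pre none b hacc with h | ⟨hb, hcb⟩
      · exact absurd h (by simp)
      · have hbs : b ≠ s := fun he => hnotpre (he ▸ hb)
        have := hmin b (by simp [hb]) hcb
        rcases this with he | hlt
        · exact absurd he hbs
        · simp [hf, hcs, hlt]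
  have hfin : List.foldl f (f (List.foldl f none pre) s) post = some s := by
    rw [hmid]
    exact pvBest_stay T A s post (fun t ht hct => by
      have hts : t ≠ s := fun he => hnotpost (he ▸ ht)
      rcases hmin t (by simp [ht]) hct with he | hlt
      · exact absurd he hts
      · exact pvKeyLt_asymm hlt)
  exact hfin

-- ---- candidate predicate: monotone under an assignment, false for the assigned cell ----
lemma pvAvail_true_bounds {A : List Bool} {r : Int} (hr : 0 ≤ r)
    (h : PySem.List.pyGetD A r false = true) : r.toNat < A.length ∧ A[r.toNat]! = true := by
  rw [PySem.List.pyGetD_of_nonneg A false hr] at h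
  rcases hlt : decide (r.toNat < A.length) with _ | _
  · simp at hlt
    rw [List.getD_eq_default _ _ (by omega)] at h
    exact absurd h (by simp)
  · simp at hlt
    refine ⟨hlt, ?_⟩
    rw [List.getD_eq_getElem _ _ hlt] at h
    simp [List.getElem!_eq_getElem?_getD, List.getElem?_eq_getElem hlt, h]

lemma pvCand_mono {T : PySem.Set Int} {A : List Bool} {c r : Int} (hr : 0 ≤ r)
    {t : Int × Int × Int} (ht : 0 ≤ t.2.1)
    (h : pvCand (PySem.Set.add T c) (PySem.List.pySetD A r false) t = true) :
    pvCand T A t = true := by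
  unfold pvCand at h ⊢
  rw [Bool.and_eq_true] at h ⊢
  constructor
  · have h1 := h.1
    rw [PySem.List.pySetD_of_nonneg A false hr, PySem.List.pyGetD_of_nonneg _ false ht] at h1
    rw [PySem.List.pyGetD_of_nonneg _ false ht]
    rw [List.getD_eq_getElem?_getD, List.getElem?_set] at h1
    rw [List.getD_eq_getElem?_getD]
    by_cases he : r.toNat = t.2.1.toNat
    · rw [if_pos he] at h1
      by_cases hlen : r.toNat < A.length
      · rw [if_pos hlen] at h1; simp at h1
      · rw [if_neg hlen] at h1; simp at h1
    · rwa [if_neg he] at h1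
  · have h2 := h.2
    rw [Bool.not_eq_eq_eq_not, Bool.not_true] at h2 ⊢
    rw [Bool.eq_false_iff] at h2 ⊢
    intro hc; apply h2
    unfold PySem.Set.contains at hc ⊢
    rw [List.contains_iff_mem] at hc ⊢
    exact (PySem.Set.mem_add T c _).mpr (Or.inl hc)

lemma pvCand_self_false {T : PySem.Set Int} {A : List Bool} {t : Int × Int × Int}
    (ht : 0 ≤ t.2.1) (h : pvCand T A t = true) :
    pvCand (PySem.Set.add T t.2.2) (PySem.List.pySetD A t.2.1 false) t = false := by
  unfold pvCand at h ⊢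
  rw [Bool.and_eq_true] at h
  obtain ⟨hb, hv⟩ := pvAvail_true_bounds ht h.1
  rw [PySem.List.pySetD_of_nonneg A false ht, PySem.List.pyGetD_of_nonneg _ false ht]
  rw [List.getD_eq_getElem?_getD, List.getElem?_set, if_pos rfl, if_pos hb]
  simp

lemma pvCount_set_true : ∀ (A : List Bool) (k : Nat), k < A.length → A[k]! = true →
    (A.set k false).count true + 1 = A.count true := by
  intro A
  induction A with
  | nil => intro k hk _; simp at hk
  | cons a A ih =>
    intro k hk hv
    cases k with
    | zero =>
      simp only [List.getElem!_eq_getElem?_getD, List.getElem?_cons_zero] at hv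
      simp at hv
      simp [List.set_cons_zero, hv]
    | succ k =>
      simp only [List.length_cons] at hk
      have hv' : A[k]! = true := by
        simpa [List.getElem!_eq_getElem?_getD] using hv
      rw [List.set_cons_succ]
      simp only [List.count_cons]
      have := ih k (by omega) hv'
      omega

lemma pvDict_insert_len (R : PySem.Dict Int Int) (k v : Int) :
    (PySem.Dict.insert R k v).items.length ≤ R.items.length + 1 := by
  unfold PySem.Dict.insert
  split
  · simp
  · simp

-- ---- the main loop equivalence ----
lemma pvLoop_eq (cells : List (Int × Int × Int))
    (hnd : cells.Nodup) (hnn : ∀ t ∈ cells, 0 ≤ t.2.1) (n : Nat) :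
    ∀ (S : List (Int × Int × Int)) (R : PySem.Dict Int Int) (T : PySem.Set Int) (A : List Bool) (fuel : Nat),
    S.Pairwise pvLt3 → (∀ t ∈ S, t ∈ cells) → (∀ t ∈ cells, pvCand T A t = true → t ∈ S) →
    R.items.length < n → A.count true + 1 ≤ fuel →
    pvLoopA n S R T A = pvLoopB cells n fuel R T A := by
  intro S
  induction S with
  | nil =>
    intro R T A fuel _ _ h3 hR hfuel
    obtain ⟨f, rfl⟩ : ∃ f, fuel = f + 1 := ⟨fuel - 1, by omega⟩
    rw [pvLoopA, pvLoopB, if_pos hR,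
      pvBest_none cells T A (fun t ht => by
        rcases hc : pvCand T A t with _ | _
        · rfl
        · exact absurd (h3 t ht hc) (List.not_mem_nil))]
  | cons s rest ih =>
    intro R T A fuel hpw hsub h3 hR hfuel
    rw [List.pairwise_cons] at hpw
    rcases hc : pvCand T A s with _ | _
    · -- skipped cell: the candidate set is unchanged
      rw [pvLoopA, show (PySem.List.pyGetD A s.2.1 false && !(PySem.Set.contains T s.2.2)) = false from hc,
        if_neg (Bool.false_ne_true)]
      exact ih R T A fuel hpw.2 (fun t ht => hsub t (List.mem_cons_of_mem _ ht))
        (fun t ht hct => by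
          rcases List.mem_cons.mp (h3 t ht hct) with he | hm
          · subst he; rw [hc] at hct; exact absurd hct (by simp)
          · exact hm)
        hR hfuel
    · -- assigned cell: s is exactly pvBest of B's round
      have hsmem : s ∈ cells := hsub s List.mem_cons_self
      have hs_nn : 0 ≤ s.2.1 := hnn s hsmem
      obtain ⟨f, rfl⟩ : ∃ f, fuel = f + 1 := ⟨fuel - 1, by omega⟩
      have hbest : pvBest cells T A = some s := by
        refine pvBest_eq_some cells T A s hnd hsmem hc ?_
        intro t ht hct
        rcases List.mem_cons.mp (h3 t ht hct) with he | hm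
        · exact Or.inl he
        · exact Or.inr (hpw.1 t hm)
      rw [pvLoopA, show (PySem.List.pyGetD A s.2.1 false && !(PySem.Set.contains T s.2.2)) = true from hc,
        if_pos rfl, pvLoopB, if_pos hR, hbest]
      simp only []
      have hc1 : PySem.List.pyGetD A s.2.1 false = true := by
        have hc' := hc
        simp only [pvCand, Bool.and_eq_true] at hc'
        exact hc'.1
      obtain ⟨hb, hv⟩ := pvAvail_true_bounds hs_nn hc1
      have hcount : (PySem.List.pySetD A s.2.1 false).count true + 1 = A.count true := by
        rw [PySem.List.pySetD_of_nonneg A false hs_nn]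
        exact pvCount_set_true A s.2.1.toNat hb hv
      have hcpos : 0 < A.count true := by
        rw [List.count_pos_iff]
        rw [List.getElem!_eq_getElem?_getD, List.getElem?_eq_getElem hb] at hv
        simp at hv
        exact hv ▸ List.getElem_mem hb
      by_cases hdone : (PySem.Dict.insert R s.2.1 s.2.2).items.length = n
      · rw [if_pos hdone]
        obtain ⟨f', rfl⟩ : ∃ f', f = f' + 1 := ⟨f - 1, by omega⟩
        rw [pvLoopB, if_neg (by omega)]
      · rw [if_neg hdone]
        refine ih _ _ _ f hpw.2 (fun t ht => hsub t (List.mem_cons_of_mem _ ht)) ?_ ?_ (by omega)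
        · intro t ht hct
          have hmem := h3 t ht (pvCand_mono hs_nn (hnn t ht) hct)
          rcases List.mem_cons.mp hmem with he | hm
          · subst he
            rw [pvCand_self_false hs_nn hc] at hct
            exact absurd hct (by simp)
          · exact hm
        · have := pvDict_insert_len R s.2.1 s.2.2
          omega

-- ===== VERDICT (by name: the statement is the Claim_ definition above) =====
theorem alternate_munkres_spec : Claim_equal_alternate_munkres := by
  intro matrix _
  unfold Spec_alternate_munkres alternate_munkres alternate_munkres_alt
  have hflat : pvFlatB matrix = pvFlatA matrix := rfl
  rw [hflat]
  by_cases hm : matrix = []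
  · subst hm; rfl
  · have hn : 0 < matrix.length := List.length_pos_of_ne_nil hm
    have hloop : pvLoopA matrix.length (PySem.List.sorted (pvFlatA matrix) (fun t => t.1) true)
        ⟨[]⟩ PySem.Set.empty (List.replicate matrix.length true)
        = pvLoopB (pvFlatA matrix) matrix.length (matrix.length + 1)
          ⟨[]⟩ PySem.Set.empty (List.replicate matrix.length true) := by
      refine pvLoop_eq (pvFlatA matrix) (pvFlat_nodup matrix) (pvFlat_nonneg matrix) matrix.length
        _ _ _ _ _ (pvSorted_pairwise _ (pvFlat_pairwise matrix)) ?_ ?_ (by simpa using hn) ?_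
      · intro t ht; exact (PySem.List.mem_sorted _ _ _ _).mp ht
      · intro t ht _; exact (PySem.List.mem_sorted _ _ _ _).mpr ht
      · simp
    show ((pvLoopA matrix.length (PySem.List.sorted (pvFlatA matrix) (fun t => t.1) true) ⟨[]⟩ PySem.Set.empty (List.replicate matrix.length true)).1.items,
          pvTotalA matrix (pvLoopA matrix.length (PySem.List.sorted (pvFlatA matrix) (fun t => t.1) true) ⟨[]⟩ PySem.Set.empty (List.replicate matrix.length true)).1.items)
        = ((pvLoopB (pvFlatA matrix) matrix.length (matrix.length + 1) ⟨[]⟩ PySem.Set.empty (List.replicate matrix.length true)).1.items,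
           pvTotalB matrix (pvLoopB (pvFlatA matrix) matrix.length (matrix.length + 1) ⟨[]⟩ PySem.Set.empty (List.replicate matrix.length true)).1.items)
    rw [hloop]
    rfl
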